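-- pv_equiv track=rewrite | github.com/MilaNedic/computing_hypervolume | moarchiving/hv_plus.py | compare_points_4d
-- ===== SOURCE A (Python) =====
-- def compare_points_4d(p1, p2):
--     for i in range(3,-1,-1):
--         c1 = p1[i] # current coordinate of the first point
--         c2 = p2[i] # current coordnate of the second point
--         if c1 < c2:
--             return -1
--         elif c2 < c1:
--             return 1
--     return 0
-- ===== SOURCE B (Python) =====
-- def compare_points_4d(p1, p2):
--     # Two-stage: collect the indices where the points differ, then decide by the
--     # highest one (reverse-lexicographic order: the most significant coordinate
--     # is the one at the largest differing index).
--     diffs = [i for i in range(4) if p1[i] != p2[i]]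
--     if not diffs:
--         return 0
--     i = max(diffs)
--     return 1 if p1[i] > p2[i] else -1
-- ===== Notes on version B (the rewrite author's own statement) =====
-- stated objective: alternative
-- what changed: Replaces A's reverse short-circuit scan with a staged computation: first collect all indices where the coordinates differ, then return the sign of the difference at the maximal (most significant) such index, 0 if there is none.
import Mathlib
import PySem

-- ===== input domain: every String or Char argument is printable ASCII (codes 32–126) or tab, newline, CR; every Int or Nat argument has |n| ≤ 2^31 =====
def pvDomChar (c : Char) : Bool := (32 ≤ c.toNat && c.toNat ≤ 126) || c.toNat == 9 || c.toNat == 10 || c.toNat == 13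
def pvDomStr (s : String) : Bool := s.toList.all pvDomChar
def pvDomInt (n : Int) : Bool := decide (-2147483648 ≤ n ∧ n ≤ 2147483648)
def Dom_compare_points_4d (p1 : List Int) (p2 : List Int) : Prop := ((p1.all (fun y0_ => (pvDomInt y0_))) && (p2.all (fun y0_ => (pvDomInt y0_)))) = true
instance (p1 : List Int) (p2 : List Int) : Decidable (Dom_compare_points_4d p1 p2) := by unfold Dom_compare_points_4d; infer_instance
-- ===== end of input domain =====

-- B replaces A's reverse short-circuit scan with a staged computation: collect the
-- differing indices, then decide by the maximal one (objective: alternative).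

-- ===== PORT A =====
-- the 'for i in range(3,-1,-1)' loop with early returns; none from pyGet? = IndexError (excluded by Pre_)
def pvGoA (p1 : List Int) (p2 : List Int) : List Int → Int
  | [] => 0
  | i :: rest =>
    match PySem.List.pyGet? p1 i, PySem.List.pyGet? p2 i with
    | some c1, some c2 =>
      if c1 < c2 then -1 else if c2 < c1 then 1 else pvGoA p1 p2 rest
    | _, _ => 0

def compare_points_4d (p1 : List Int) (p2 : List Int) : Int :=
  pvGoA p1 p2 (PySem.List.pyRange 3 (-1) (-1))

-- ===== PORT B =====
-- the list comprehension [i for i in range(4) if p1[i] != p2[i]]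
def pvDiffIdxs (p1 : List Int) (p2 : List Int) : List Int :=
  (PySem.List.pyRange 0 4 1).filter
    (fun i => PySem.List.pyGet? p1 i != PySem.List.pyGet? p2 i)

def compare_points_4d_alt (p1 : List Int) (p2 : List Int) : Int :=
  let diffs := pvDiffIdxs p1 p2
  match PySem.List.max? diffs (fun i => i) with
  | none => 0
  | some i =>
    if (PySem.List.pyGet? p1 i).getD 0 > (PySem.List.pyGet? p2 i).getD 0 then 1 else -1

-- ===== PRECONDITION & SPEC =====
-- A indexes p1[i], p2[i] for i = 3..0, so it raises IndexError unless both lists have length ≥ 4.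
def Pre_compare_points_4d (p1 : List Int) (p2 : List Int) : Prop :=
  4 ≤ p1.length ∧ 4 ≤ p2.length
instance (p1 : List Int) (p2 : List Int) : Decidable (Pre_compare_points_4d p1 p2) := by
  unfold Pre_compare_points_4d; infer_instance

def pvWitness_compare_points_4d : List Int × List Int := ([1, 2, 3, 4], [1, 2, 4, 4])

def Spec_compare_points_4d (p1 : List Int) (p2 : List Int) (out : Int) : Prop := out = compare_points_4d_alt p1 p2
instance (p1 : List Int) (p2 : List Int) (out : Int) : Decidable (Spec_compare_points_4d p1 p2 out) := by unfold Spec_compare_points_4d; infer_instance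

-- ===== CLAIM (what is proved, stated in full; the proofs are below) =====
def Claim_equal_compare_points_4d : Prop := ∀ (p1 : List Int) (p2 : List Int), Dom_compare_points_4d p1 p2 → Pre_compare_points_4d p1 p2 → Spec_compare_points_4d p1 p2 (compare_points_4d p1 p2)

-- ===== LEMMAS AND PROOFS =====

theorem pvRangeDown_eval : PySem.List.pyRange 3 (-1) (-1) = [3, 2, 1, 0] := by
  simp [PySem.List.pyRange, List.range_succ]

theorem pvRangeUp_eval : PySem.List.pyRange 0 4 1 = [0, 1, 2, 3] := by
  simp [PySem.List.pyRange, List.range_succ]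

-- ===== VERDICT (by name: the statement is the Claim_ definition above) =====
theorem compare_points_4d_spec : Claim_equal_compare_points_4d := by
  intro p1 p2 _ hpre
  obtain ⟨h1, h2⟩ := hpre
  unfold Spec_compare_points_4d
  match p1, p2 with
  | a0 :: a1 :: a2 :: a3 :: t1, b0 :: b1 :: b2 :: b3 :: t2 =>
    show pvGoA _ _ (PySem.List.pyRange 3 (-1) (-1)) = _
    have c3 : (3 : Int) = ((3 : Nat) : Int) := by norm_num
    have c2 : (2 : Int) = ((2 : Nat) : Int) := by norm_num
    have c1 : (1 : Int) = ((1 : Nat) : Int) := by norm_num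
    have c0 : (0 : Int) = ((0 : Nat) : Int) := by norm_num
    rw [pvRangeDown_eval]
    simp only [compare_points_4d_alt, pvDiffIdxs, pvRangeUp_eval]
    simp only [pvGoA, List.filter_cons, List.filter_nil,
      c3, c2, c1, c0, PySem.List.pyGet?_natCast, List.getElem?_cons_succ, List.getElem?_cons_zero,
      bne_iff_ne, ne_eq, Option.some.injEq]
    by_cases h3 : a3 = b3 <;> by_cases hb2 : a2 = b2 <;> by_cases hb1 : a1 = b1 <;> by_cases h0 : a0 = b0 <;>
      (simp [h3, hb2, hb1, h0, PySem.List.max?] <;>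
       simp only [c3, c2, c1, c0, PySem.List.pyGet?_natCast, List.getElem?_cons_succ,
         List.getElem?_cons_zero, Option.getD_some] <;> split_ifs <;> omega)
  | [], _ => simp at h1
  | [_], _ => simp at h1
  | [_, _], _ => simp at h1
  | [_, _, _], _ => simp at h1
  | _ :: _ :: _ :: _ :: _, [] => simp at h2
  | _ :: _ :: _ :: _ :: _, [_] => simp at h2
  | _ :: _ :: _ :: _ :: _, [_, _] => simp at h2
  | _ :: _ :: _ :: _ :: _, [_, _, _] => simp at h2
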